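-- pv_equiv track=rewrite | github.com/lokiimp/satellite_digitize.py | tlefix.py | calc_checksum
-- ===== SOURCE A (Python) =====
-- def calc_checksum(line):
--     """TLE checksum: sum of all digits plus 1 per minus sign, modulo 10."""
--     total = 0
--     for ch in line[:68]:  # exclude checksum digit itself
--         if ch.isdigit():
--             total += int(ch)
--         elif ch == '-':
--             total += 1
--     return total % 10
-- ===== SOURCE B (Python) =====
-- # Table-driven recursive reimplementation: per-character contributions come from a
-- # lookup dict, combined by a recursive fold that reduces mod 10 at every step.
-- _CONTRIB = {'-': 1, '0': 0, '1': 1, '2': 2, '3': 3, '4': 4,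
--             '5': 5, '6': 6, '7': 7, '8': 8, '9': 9}
--
--
-- def _chk(s):
--     if not s:
--         return 0
--     return (_CONTRIB.get(s[0], 0) + _chk(s[1:])) % 10
--
--
-- def calc_checksum(line):
--     """TLE checksum: sum of all digits plus 1 per minus sign, modulo 10."""
--     return _chk(line[:68])
-- ===== Notes on version B (the rewrite author's own statement) =====
-- stated objective: alternative
-- what changed: Replaces A's branching accumulator loop (isdigit test, int() conversion, minus test) with a precomputed character-contribution table and a recursive fold that looks each character up in the table and reduces modulo 10 at every step instead of once at the end.
import Mathlib
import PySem

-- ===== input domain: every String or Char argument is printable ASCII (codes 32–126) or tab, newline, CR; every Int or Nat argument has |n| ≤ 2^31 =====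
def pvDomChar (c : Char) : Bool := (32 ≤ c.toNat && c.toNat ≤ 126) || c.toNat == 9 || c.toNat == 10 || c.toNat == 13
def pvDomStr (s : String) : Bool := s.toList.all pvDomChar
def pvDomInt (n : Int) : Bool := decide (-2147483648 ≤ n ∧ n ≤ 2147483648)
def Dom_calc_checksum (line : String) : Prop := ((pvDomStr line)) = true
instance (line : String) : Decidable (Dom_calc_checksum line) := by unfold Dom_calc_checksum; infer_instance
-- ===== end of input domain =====

-- B replaces A's branching accumulator loop with a contribution table and a recursive
-- mod-10-at-each-step fold; an alternative decomposition, same cost.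

-- ===== PORT A =====
-- one pass: branch on isdigit, then on '-' (int(ch) on a digit char is its value, ch - '0')
def calc_checksum (line : String) : Int :=
  PySem.Int.mod
    ((PySem.List.slice line.toList none (some 68)).foldl
      (fun total ch =>
        if PySem.Chars.isdigit ch then total + ((ch.toNat : Int) - 48)
        else if ch = '-' then total + 1
        else total) 0)
    10

-- ===== PORT B =====
-- the module-level contribution table _CONTRIB
def contribDict : PySem.Dict Char Int :=
  PySem.Dict.ofList [('-',1),('0',0),('1',1),('2',2),('3',3),('4',4),('5',5),('6',6),('7',7),('8',8),('9',9)]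

-- the recursive helper _chk: empty → 0, else (table lookup of head + _chk(tail)) % 10
def chkGo : List Char → Int
  | [] => 0
  | c :: cs => PySem.Int.mod (PySem.Dict.getD contribDict c 0 + chkGo cs) 10

def calc_checksum_alt (line : String) : Int :=
  chkGo (PySem.List.slice line.toList none (some 68))

-- ===== PRECONDITION & SPEC =====
def Spec_calc_checksum (line : String) (out : Int) : Prop := out = calc_checksum_alt line
instance (line : String) (out : Int) : Decidable (Spec_calc_checksum line out) := by unfold Spec_calc_checksum; infer_instance

-- ===== CLAIM (what is proved, stated in full; the proofs are below) =====
def Claim_equal_calc_checksum : Prop := ∀ (line : String), Dom_calc_checksum line → Spec_calc_checksum line (calc_checksum line)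

-- ===== LEMMAS AND PROOFS =====

theorem char_eq_of_toNat {c d : Char} (h : c.toNat = d.toNat) : c = d :=
  Char.ext (UInt32.toNat_inj.mp h)

-- the table lookup computes exactly A's per-character branch value
theorem contrib_eq (c : Char) :
    PySem.Dict.getD contribDict c 0 =
      (if PySem.Chars.isdigit c then ((c.toNat : Int) - 48) else if c = '-' then 1 else 0) := by
  by_cases h : PySem.Chars.isdigit c
  · rw [if_pos h]
    simp only [PySem.Chars.isdigit, Bool.and_eq_true, decide_eq_true_eq] at h
    obtain ⟨h1, h2⟩ := h
    have hl : 48 ≤ c.toNat := UInt32.le_iff_toNat_le.mp (Char.le_def.mp h1)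
    have hr : c.toNat ≤ 57 := UInt32.le_iff_toNat_le.mp (Char.le_def.mp h2)
    interval_cases hn : c.toNat <;>
      first
      | (rw [char_eq_of_toNat (d := '0') hn]; decide)
      | (rw [char_eq_of_toNat (d := '1') hn]; decide)
      | (rw [char_eq_of_toNat (d := '2') hn]; decide)
      | (rw [char_eq_of_toNat (d := '3') hn]; decide)
      | (rw [char_eq_of_toNat (d := '4') hn]; decide)
      | (rw [char_eq_of_toNat (d := '5') hn]; decide)
      | (rw [char_eq_of_toNat (d := '6') hn]; decide)
      | (rw [char_eq_of_toNat (d := '7') hn]; decide)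
      | (rw [char_eq_of_toNat (d := '8') hn]; decide)
      | (rw [char_eq_of_toNat (d := '9') hn]; decide)
  · rw [if_neg h]
    by_cases hm : c = '-'
    · subst hm; decide
    · rw [if_neg hm]
      have hd : ∀ k : Nat, 48 ≤ k → k ≤ 57 → c.toNat ≠ k := by
        intro k hk1 hk2 hck
        apply h
        simp only [PySem.Chars.isdigit, Bool.and_eq_true, decide_eq_true_eq]
        have hct : c.toNat = c.val.toNat := rfl
        have h0t : ('0' : Char).val.toNat = 48 := rfl
        have h9t : ('9' : Char).val.toNat = 57 := rfl
        constructor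
        · exact Char.le_def.mpr (UInt32.le_iff_toNat_le.mpr (by omega))
        · exact Char.le_def.mpr (UInt32.le_iff_toNat_le.mpr (by omega))
      have hne : ∀ d : Char, 48 ≤ d.toNat → d.toNat ≤ 57 → c ≠ d := by
        intro d hd1 hd2 hcd; exact hd d.toNat hd1 hd2 (by rw [hcd])
      have e0 := hne '0' (by decide) (by decide)
      have e1 := hne '1' (by decide) (by decide)
      have e2 := hne '2' (by decide) (by decide)
      have e3 := hne '3' (by decide) (by decide)
      have e4 := hne '4' (by decide) (by decide)
      have e5 := hne '5' (by decide) (by decide)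
      have e6 := hne '6' (by decide) (by decide)
      have e7 := hne '7' (by decide) (by decide)
      have e8 := hne '8' (by decide) (by decide)
      have e9 := hne '9' (by decide) (by decide)
      have hdict : contribDict = PySem.Dict.mk [('-',1),('0',0),('1',1),('2',2),('3',3),('4',4),('5',5),('6',6),('7',7),('8',8),('9',9)] := by decide
      simp [hdict, PySem.Dict.getD_eq_get?_getD, PySem.Dict.get?,
        Ne.symm hm, Ne.symm e0, Ne.symm e1, Ne.symm e2, Ne.symm e3, Ne.symm e4,
        Ne.symm e5, Ne.symm e6, Ne.symm e7, Ne.symm e8, Ne.symm e9]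

-- A's fold starting from t equals t plus the fold from 0
theorem fold_shift (cs : List Char) (t : Int) :
    cs.foldl
      (fun total ch =>
        if PySem.Chars.isdigit ch then total + ((ch.toNat : Int) - 48)
        else if ch = '-' then total + 1
        else total) t
    = t + cs.foldl
      (fun total ch =>
        if PySem.Chars.isdigit ch then total + ((ch.toNat : Int) - 48)
        else if ch = '-' then total + 1
        else total) 0 := by
  induction cs generalizing t with
  | nil => simp
  | cons c cs ih =>
    simp only [List.foldl_cons]
    rw [ih, ih (if PySem.Chars.isdigit c then 0 + ((c.toNat : Int) - 48)
        else if c = '-' then 0 + 1 else (0:Int))]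
    split_ifs <;> ring

-- B's recursive mod-10 fold equals A's fold reduced mod 10 once at the end
theorem chk_eq (cs : List Char) :
    chkGo cs = PySem.Int.mod
      (cs.foldl
        (fun total ch =>
          if PySem.Chars.isdigit ch then total + ((ch.toNat : Int) - 48)
          else if ch = '-' then total + 1
          else total) 0) 10 := by
  induction cs with
  | nil => decide
  | cons c cs ih =>
    simp only [chkGo, List.foldl_cons, contrib_eq, ih]
    conv_rhs => rw [fold_shift]
    simp only [PySem.Int.mod_eq_emod_of_pos (by norm_num : (0:Int) < 10)]
    split_ifs <;> omega

-- ===== VERDICT (by name: the statement is the Claim_ definition above) =====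
theorem calc_checksum_spec : Claim_equal_calc_checksum := by
  intro line _
  unfold Spec_calc_checksum calc_checksum calc_checksum_alt
  rw [chk_eq]
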